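-- pv_equiv track=rewrite | github.com/ekellbuch/OpenThoughts-Agent | hpc/launch_utils.py | _escape_bash_variables
-- ===== SOURCE A (Python) =====
-- def _escape_bash_variables(text: str) -> str:
--     result: list[str] = []
--     i = 0
--     length = len(text)
--     while i < length:
--         if text[i] == "$" and i + 1 < length and text[i + 1] == "{":
--             start = i
--             depth = 1
--             j = i + 2
--             while j < length and depth > 0:
--                 if text[j] == "{":
--                     depth += 1
--                 elif text[j] == "}":
--                     depth -= 1
--                 j += 1
--             inner = text[i + 2 : j - 1]
--             escaped_inner = _escape_bash_variables(inner)
--             result.append("${{" + escaped_inner + "}}")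
--             i = j
--         else:
--             result.append(text[i])
--             i += 1
--     return "".join(result)
-- ===== SOURCE B (Python) =====
-- def _escape_bash_variables(text: str) -> str:
--     # Single pass with an explicit stack of open braces: each "${"-opened brace
--     # that finds its matching "}" gets both braces doubled; everything else is
--     # copied verbatim (an unclosed "${" is left untouched).
--     out: list[str] = []
--     stack: list[tuple[bool, int]] = []  # (is_dollar_brace, index in out)
--     i = 0
--     length = len(text)
--     while i < length:
--         c = text[i]
--         if c == "$" and i + 1 < length and text[i + 1] == "{":
--             out.append("${")
--             stack.append((True, len(out) - 1))
--             i += 2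
--         elif c == "{":
--             out.append("{")
--             stack.append((False, len(out) - 1))
--             i += 1
--         elif c == "}":
--             if stack:
--                 is_dollar, idx = stack.pop()
--                 if is_dollar:
--                     out[idx] = "${{"
--                     out.append("}}")
--                 else:
--                     out.append("}")
--             else:
--                 out.append("}")
--             i += 1
--         else:
--             out.append(c)
--             i += 1
--     return "".join(out)
-- ===== Notes on version B (the rewrite author's own statement) =====
-- stated objective: alternative
-- what changed: Replaced A's recursive re-scanning (find the matching brace with a counting loop, slice out the inner text, recurse on it) by a single left-to-right pass with an explicit stack of open braces that doubles the braces of each matched ${...} pair in place.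
-- intended difference: On inputs containing a ${ whose brace is never closed, A silently drops the last character of the unfinished region and invents a closing }} (e.g. '${a' -> '${{}}'), while B leaves the unclosed ${ and its tail verbatim ('${a' -> '${a'), which is the intended treatment of an incomplete variable reference. — e.g. on _escape_bash_variables("${a"): A returns "${{}}", B returns "${a"
import Mathlib
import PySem

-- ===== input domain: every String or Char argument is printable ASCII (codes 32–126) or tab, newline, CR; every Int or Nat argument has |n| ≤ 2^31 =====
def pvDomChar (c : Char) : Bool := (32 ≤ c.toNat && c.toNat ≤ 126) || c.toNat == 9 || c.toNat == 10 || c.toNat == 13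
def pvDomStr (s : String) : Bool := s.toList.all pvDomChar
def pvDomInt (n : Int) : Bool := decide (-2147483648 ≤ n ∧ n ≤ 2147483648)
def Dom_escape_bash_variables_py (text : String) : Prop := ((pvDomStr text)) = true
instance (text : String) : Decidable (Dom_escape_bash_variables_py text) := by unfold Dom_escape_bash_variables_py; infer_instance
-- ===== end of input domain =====

-- B replaces A's recursive re-scanning of ${...} regions by a single left-to-right pass
-- with an explicit stack of open braces (a different algorithm; not measured faster on the
-- generated inputs); on the exceptional unclosed-${ inputs (D_ below) B intentionally
-- leaves the text verbatim where A truncates it — see the stated difference.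

-- ===== PORT A =====
-- inner while loop of A: scan with a depth counter, return (consumed chars, rest)
def pvScanClose (l : List Char) (depth : Int) : List Char × List Char :=
  if depth ≤ 0 then ([], l)
  else match l with
  | [] => ([], [])
  | c :: cs =>
    let d := if c = '{' then depth + 1 else if c = '}' then depth - 1 else depth
    let r := pvScanClose cs d
    (c :: r.1, r.2)

theorem pvScanClose_len : ∀ (l : List Char) (d : Int),
    (pvScanClose l d).1.length + (pvScanClose l d).2.length = l.length := by
  intro l
  induction l with
  | nil => intro d; unfold pvScanClose; split <;> simp
  | cons c cs IH =>
    intro d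
    unfold pvScanClose
    split
    · simp
    · have h := IH (if c = '{' then d + 1 else if c = '}' then d - 1 else d)
      simp only [List.length_cons]
      omega

-- outer while loop of A (list of result chars instead of joined string fragments)
def pvEscA (l : List Char) : List Char :=
  match l with
  | [] => []
  | c :: cs =>
    if c = '$' ∧ cs.head? = some '{' then
      let r := pvScanClose cs.tail 1
      '$' :: '{' :: '{' :: (pvEscA r.1.dropLast ++ '}' :: '}' :: pvEscA r.2)
    else c :: pvEscA cs
termination_by l.length
decreasing_by
  · have h := pvScanClose_len cs.tail 1
    have h2 : cs.tail.length ≤ cs.length := by cases cs <;> simp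
    simp only [List.length_cons, List.length_dropLast]
    omega
  · have h := pvScanClose_len cs.tail 1
    have h2 : cs.tail.length ≤ cs.length := by cases cs <;> simp
    simp only [List.length_cons]
    omega
  · simp

def escape_bash_variables_py (text : String) : String :=
  (pvEscA text.toList).asString

-- ===== PORT B =====
-- single pass; out = list of emitted fragments, stk = (is_dollar_brace, index into out)
def pvLoopB (l : List Char) (out : List (List Char)) (stk : List (Bool × Nat)) :
    List (List Char) × List (Bool × Nat) :=
  match l with
  | [] => (out, stk)
  | c :: rest =>
    if c = '$' ∧ rest.head? = some '{' then
      pvLoopB rest.tail (out ++ [['$', '{']]) ((true, out.length) :: stk)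
    else if c = '{' then
      pvLoopB rest (out ++ [['{']]) ((false, out.length) :: stk)
    else if c = '}' then
      match stk with
      | (isD, idx) :: stk' =>
        if isD then pvLoopB rest ((out.set idx ['$', '{', '{']) ++ [['}', '}']]) stk'
        else pvLoopB rest (out ++ [['}']]) stk'
      | [] => pvLoopB rest (out ++ [['}']]) stk
    else pvLoopB rest (out ++ [[c]]) stk
termination_by l.length
decreasing_by
  · have : rest.tail.length ≤ rest.length := by cases rest <;> simp
    simp only [List.length_cons]; omega
  all_goals simp

def escape_bash_variables_py_alt (text : String) : String :=
  ((pvLoopB text.toList [] []).1.flatten).asString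

-- ===== PRECONDITION & SPEC =====
-- delta of one char on the brace-nesting depth (used only to state D_ below)
def pvBraceDelta (c : Char) : Int := ([c].count '{' : Int) - ([c].count '}' : Int)

-- one right-to-left pass; state = (found unclosed "${", next char,
-- min prefix-depth-delta of the suffix, the same one position further right)
def pvSuffixScan (l : List Char) : Bool × Option Char × Int × Int :=
  l.foldr (fun c st =>
      (st.1 || (c == '$' && st.2.1 == some '{' && decide (0 ≤ st.2.2.2)),
        some c,
        min (pvBraceDelta c) (pvBraceDelta c + st.2.2.1),
        st.2.2.1))
    (false, none, 0, 0)

-- On inputs containing a "${" whose brace is never closed (i.e. in no prefix of the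
-- remainder do closing braces outnumber opening ones), A silently drops the last
-- character of the unfinished region and invents a closing "}}" (e.g. "${a" → "${{}}"),
-- while B leaves the unclosed "${" and its tail verbatim ("${a" → "${a"), which is the
-- intended treatment of an incomplete variable reference.
def D_escape_bash_variables_py (text : String) : Prop :=
  (pvSuffixScan text.toList).1 = true
instance (text : String) : Decidable (D_escape_bash_variables_py text) := by
  unfold D_escape_bash_variables_py; infer_instance

def Spec_escape_bash_variables_py (text : String) (out : String) : Prop :=
  ¬ D_escape_bash_variables_py text → out = escape_bash_variables_py_alt text
instance (text : String) (out : String) : Decidable (Spec_escape_bash_variables_py text out) := by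
  unfold Spec_escape_bash_variables_py; infer_instance

def pvDiffWitness_escape_bash_variables_py : String := "${a"
def pvDiffWitnessOut_escape_bash_variables_py : String × String := ("${{}}", "${a")

-- ===== CLAIM (what is proved, stated in full; the proofs are below) =====
def Claim_unchanged_escape_bash_variables_py : Prop :=
  ∀ (text : String), Dom_escape_bash_variables_py text →
    Spec_escape_bash_variables_py text (escape_bash_variables_py text)

def Claim_changed_escape_bash_variables_py : Prop :=
  Dom_escape_bash_variables_py (pvDiffWitness_escape_bash_variables_py) ∧
  D_escape_bash_variables_py (pvDiffWitness_escape_bash_variables_py) ∧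
  escape_bash_variables_py (pvDiffWitness_escape_bash_variables_py) = pvDiffWitnessOut_escape_bash_variables_py.1 ∧
  escape_bash_variables_py_alt (pvDiffWitness_escape_bash_variables_py) = pvDiffWitnessOut_escape_bash_variables_py.2 ∧
  pvDiffWitnessOut_escape_bash_variables_py.1 ≠ pvDiffWitnessOut_escape_bash_variables_py.2

-- ===== LEMMAS AND PROOFS =====

-- proof-side depth scan characterising D_ (used only in the lemmas below)
def pvReaches0 (l : List Char) (d : Int) : Bool :=
  match l with
  | [] => false
  | c :: cs =>
    let d' := if c = '{' then d + 1 else if c = '}' then d - 1 else d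
    if d' = 0 then true else pvReaches0 cs d'

def pvNoUnclosed : List Char → Bool
  | [] => true
  | c :: cs =>
    if c = '$' ∧ cs.head? = some '{' then pvReaches0 cs.tail 1 && pvNoUnclosed cs
    else pvNoUnclosed cs

-- balanced brace strings (Dyck words over '{','}' with arbitrary other chars)
inductive PvBal : List Char → Prop
  | nil : PvBal []
  | ch : ∀ (c : Char) (l : List Char), c ≠ '{' → c ≠ '}' → PvBal l → PvBal (c :: l)
  | brace : ∀ (l₁ l₂ : List Char), PvBal l₁ → PvBal l₂ → PvBal ('{' :: l₁ ++ '}' :: l₂)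

theorem pvc2 : ('}' : Char) ≠ '{' := by decide
theorem pvc5 : ('{' : Char) ≠ '$' := by decide
theorem pvc6 : ('}' : Char) ≠ '$' := by decide

-- step equations for the recursive definitions
theorem pvScanClose_zero (l : List Char) (d : Int) (h : d ≤ 0) :
    pvScanClose l d = ([], l) := by
  cases l <;> (unfold pvScanClose; rw [if_pos h])

theorem pvScanClose_cons (c : Char) (cs : List Char) (d : Int) (h : 1 ≤ d) :
    pvScanClose (c :: cs) d =
      ((c :: (pvScanClose cs (if c = '{' then d + 1 else if c = '}' then d - 1 else d)).1),
        (pvScanClose cs (if c = '{' then d + 1 else if c = '}' then d - 1 else d)).2) := by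
  have hne : ¬ d ≤ 0 := by omega
  conv_lhs => rw [pvScanClose, if_neg hne]

theorem pvEscA_nil : pvEscA [] = [] := by rw [pvEscA]

theorem pvEscA_group (c : Char) (cs : List Char) (h : c = '$' ∧ cs.head? = some '{') :
    pvEscA (c :: cs) = '$' :: '{' :: '{' ::
      (pvEscA (pvScanClose cs.tail 1).1.dropLast ++ '}' :: '}' :: pvEscA (pvScanClose cs.tail 1).2) := by
  rw [pvEscA, if_pos h]

theorem pvEscA_ch (c : Char) (cs : List Char) (h : ¬(c = '$' ∧ cs.head? = some '{')) :
    pvEscA (c :: cs) = c :: pvEscA cs := by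
  rw [pvEscA, if_neg h]

theorem pvLoopB_nil (out : List (List Char)) (stk : List (Bool × Nat)) :
    pvLoopB [] out stk = (out, stk) := by rw [pvLoopB]

theorem pvLoopB_group (c : Char) (rest : List Char) (out : List (List Char)) (stk : List (Bool × Nat))
    (h : c = '$' ∧ rest.head? = some '{') :
    pvLoopB (c :: rest) out stk =
      pvLoopB rest.tail (out ++ [['$', '{']]) ((true, out.length) :: stk) := by
  rcases stk with _ | ⟨⟨isD, idx⟩, stk'⟩ <;> (rw [pvLoopB]; rw [if_pos h])

theorem pvLoopB_lbrace (rest : List Char) (out : List (List Char)) (stk : List (Bool × Nat)) :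
    pvLoopB ('{' :: rest) out stk =
      pvLoopB rest (out ++ [['{']]) ((false, out.length) :: stk) := by
  rcases stk with _ | ⟨⟨isD, idx⟩, stk'⟩ <;> (rw [pvLoopB]; rw [if_neg (by simp [pvc5]), if_pos rfl])

theorem pvLoopB_rbrace_pop (rest : List Char) (out : List (List Char))
    (isD : Bool) (idx : Nat) (stk' : List (Bool × Nat)) :
    pvLoopB ('}' :: rest) out ((isD, idx) :: stk') =
      if isD then pvLoopB rest ((out.set idx ['$', '{', '{']) ++ [['}', '}']]) stk'
      else pvLoopB rest (out ++ [['}']]) stk' := by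
  rw [pvLoopB]; rw [if_neg (by simp [pvc6]), if_neg pvc2, if_pos rfl]

theorem pvLoopB_rbrace_pop_true (rest : List Char) (out : List (List Char))
    (idx : Nat) (stk' : List (Bool × Nat)) :
    pvLoopB ('}' :: rest) out ((true, idx) :: stk') =
      pvLoopB rest ((out.set idx ['$', '{', '{']) ++ [['}', '}']]) stk' := by
  rw [pvLoopB_rbrace_pop, if_pos rfl]

theorem pvLoopB_rbrace_pop_false (rest : List Char) (out : List (List Char))
    (idx : Nat) (stk' : List (Bool × Nat)) :
    pvLoopB ('}' :: rest) out ((false, idx) :: stk') =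
      pvLoopB rest (out ++ [['}']]) stk' := by
  rw [pvLoopB_rbrace_pop, if_neg (by simp)]

theorem pvLoopB_rbrace_nil (rest : List Char) (out : List (List Char)) :
    pvLoopB ('}' :: rest) out [] = pvLoopB rest (out ++ [['}']]) [] := by
  rw [pvLoopB]; rw [if_neg (by simp [pvc6]), if_neg pvc2, if_pos rfl]

theorem pvLoopB_other (c : Char) (rest : List Char) (out : List (List Char)) (stk : List (Bool × Nat))
    (h : ¬(c = '$' ∧ rest.head? = some '{')) (h2 : c ≠ '{') (h3 : c ≠ '}') :
    pvLoopB (c :: rest) out stk = pvLoopB rest (out ++ [[c]]) stk := by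
  rcases stk with _ | ⟨⟨isD, idx⟩, stk'⟩ <;> (rw [pvLoopB]; rw [if_neg h, if_neg h2, if_neg h3])

theorem pvReaches0_cons (c : Char) (cs : List Char) (d : Int) :
    pvReaches0 (c :: cs) d =
      (if (if c = '{' then d + 1 else if c = '}' then d - 1 else d) = 0 then true
       else pvReaches0 cs (if c = '{' then d + 1 else if c = '}' then d - 1 else d)) := by
  rw [pvReaches0]

theorem pvNoUnclosed_cons (c : Char) (cs : List Char) :
    pvNoUnclosed (c :: cs) =
      (if c = '$' ∧ cs.head? = some '{' then pvReaches0 cs.tail 1 && pvNoUnclosed cs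
       else pvNoUnclosed cs) := by
  rw [pvNoUnclosed]

theorem pvSet_at_append : ∀ {α : Type} (a : List α) (x : α) (c : List α) (v : α),
    (a ++ x :: c).set a.length v = a ++ v :: c := by
  intro α a
  induction a with
  | nil => intro x c v; rfl
  | cons h t IH => intro x c v; simp [IH]

-- first-return decomposition of a depth scan that reaches 0
theorem pvReach_decomp : ∀ (n : Nat) (l : List Char) (d : Int), l.length ≤ n → 1 ≤ d →
    pvReaches0 l d = true →
    ∃ inner rest, l = inner ++ '}' :: rest ∧ PvBal inner ∧
      (d = 1 ∨ pvReaches0 rest (d - 1) = true) := by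
  intro n
  induction n with
  | zero =>
    intro l d hl _ h
    cases l with
    | nil => rw [pvReaches0] at h; simp at h
    | cons c cs => simp at hl
  | succ n IH =>
    intro l d hl hd h
    cases l with
    | nil => rw [pvReaches0] at h; simp at h
    | cons c cs =>
      rw [pvReaches0_cons] at h
      simp only [List.length_cons] at hl
      by_cases hc : c = '{'
      · rw [if_pos hc] at h
        rw [if_neg (by omega)] at h
        obtain ⟨i, r, hcs, hbi, hcond⟩ := IH cs (d + 1) (by omega) (by omega) h
        have hr : pvReaches0 r d = true := by
          rcases hcond with h1 | h2
          · omega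
          · simpa using h2
        have hrlen : r.length ≤ n := by
          have hlen := congrArg List.length hcs
          simp only [List.length_append, List.length_cons] at hlen
          omega
        obtain ⟨i2, r2, hr2, hbi2, hcond2⟩ := IH r d hrlen hd hr
        refine ⟨'{' :: i ++ '}' :: i2, r2, ?_, PvBal.brace i i2 hbi hbi2, hcond2⟩
        subst hc hcs hr2; simp
      · rw [if_neg hc] at h
        by_cases hc2 : c = '}'
        · rw [if_pos hc2] at h
          by_cases hd1 : d = 1
          · exact ⟨[], cs, by simp [hc2], PvBal.nil, Or.inl hd1⟩
          · rw [if_neg (by omega)] at h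
            exact ⟨[], cs, by simp [hc2], PvBal.nil, Or.inr h⟩
        · rw [if_neg hc2, if_neg (by omega)] at h
          obtain ⟨i, r, hcs, hbi, hcond⟩ := IH cs d (by omega) hd h
          exact ⟨c :: i, r, by simp [hcs], PvBal.ch c i hc hc2 hbi, hcond⟩

-- a balanced prefix is consumed transparently by pvScanClose
theorem pvScanClose_bal : ∀ (l : List Char), PvBal l → ∀ (d : Int), 1 ≤ d → ∀ (tail : List Char),
    pvScanClose (l ++ tail) d = (l ++ (pvScanClose tail d).1, (pvScanClose tail d).2) := by
  intro l hb
  induction hb with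
  | nil => intro d hd tail; simp
  | ch c l hc1 hc2 _ IH =>
    intro d hd tail
    rw [List.cons_append, pvScanClose_cons c _ d hd, if_neg hc1, if_neg hc2]
    rw [IH d hd tail]
    simp
  | brace l₁ l₂ _ _ IH1 IH2 =>
    intro d hd tail
    have e1 : ('{' :: l₁ ++ '}' :: l₂) ++ tail = '{' :: (l₁ ++ ('}' :: (l₂ ++ tail))) := by simp
    rw [e1, pvScanClose_cons _ _ d hd, if_pos rfl]
    rw [IH1 (d + 1) (by omega) ('}' :: (l₂ ++ tail))]
    rw [pvScanClose_cons _ _ (d + 1) (by omega), if_neg pvc2, if_pos rfl]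
    rw [show d + 1 - 1 = d from by omega]
    rw [IH2 d hd tail]
    simp

theorem pvScanClose_group (inner rest2 : List Char) (h : PvBal inner) :
    pvScanClose (inner ++ '}' :: rest2) 1 = (inner ++ ['}'], rest2) := by
  rw [pvScanClose_bal inner h 1 (by omega) ('}' :: rest2)]
  rw [pvScanClose_cons _ _ 1 (by omega), if_neg pvc2, if_pos rfl]
  rw [show (1 : Int) - 1 = 0 from by omega]
  rw [pvScanClose_zero rest2 0 (by omega)]

-- pvEscA distributes over a balanced prefix (when the tail cannot start a group's '{')
theorem pvEscA_append : ∀ (n : Nat) (l : List Char), l.length ≤ n → PvBal l →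
    ∀ (tail : List Char), tail.head? ≠ some '{' →
    pvEscA (l ++ tail) = pvEscA l ++ pvEscA tail := by
  intro n
  induction n with
  | zero =>
    intro l hl hb tail htail
    cases l with
    | nil => simp [pvEscA_nil]
    | cons c cs => simp at hl
  | succ n IH =>
    intro l hl hb tail htail
    cases hb with
    | nil => simp [pvEscA_nil]
    | ch c l' hc1 hc2 hbl' =>
      simp only [List.length_cons] at hl
      by_cases hg : c = '$' ∧ l'.head? = some '{'
      · obtain ⟨hcd, hh⟩ := hg
        cases hbl' with
        | nil => simp at hh
        | ch c2 l2 hq1 _ _ => simp at hh; exact absurd hh hq1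
        | brace b1 b2 hb1 hb2 =>
          have hlen2 : b2.length ≤ n := by
            simp only [List.length_cons, List.length_append] at hl; omega
          have e0 : '{' :: b1 ++ '}' :: b2 = '{' :: (b1 ++ '}' :: b2) := by simp
          rw [e0]
          have eL : (c :: ('{' :: (b1 ++ '}' :: b2))) ++ tail
              = c :: ('{' :: (b1 ++ '}' :: (b2 ++ tail))) := by simp
          rw [eL, pvEscA_group c _ ⟨hcd, rfl⟩]
          simp only [List.tail_cons]
          rw [pvScanClose_group b1 (b2 ++ tail) hb1]
          rw [pvEscA_group c _ ⟨hcd, rfl⟩]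
          simp only [List.tail_cons]
          rw [pvScanClose_group b1 b2 hb1]
          simp only [List.dropLast_concat]
          rw [IH b2 hlen2 hb2 tail htail]
          simp
      · have hg' : ¬(c = '$' ∧ (l' ++ tail).head? = some '{') := by
          intro hx
          rcases hx with ⟨hx1, hx2⟩
          cases l' with
          | nil => exact htail (by simpa using hx2)
          | cons y ys => exact hg ⟨hx1, by simpa using hx2⟩
        rw [List.cons_append, pvEscA_ch c _ hg', pvEscA_ch c _ hg]
        rw [IH l' (by omega) hbl' tail htail]
        simp
    | brace b1 b2 hb1 hb2 =>
      simp only [List.length_cons, List.length_append] at hl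
      have hlen1 : b1.length ≤ n := by omega
      have hlen2 : b2.length ≤ n := by omega
      have e0 : '{' :: b1 ++ '}' :: b2 = '{' :: (b1 ++ '}' :: b2) := by simp
      rw [e0]
      have eL : ('{' :: (b1 ++ '}' :: b2)) ++ tail = '{' :: (b1 ++ '}' :: (b2 ++ tail)) := by simp
      rw [eL, pvEscA_ch _ _ (by simp [pvc5])]
      rw [IH b1 hlen1 hb1 ('}' :: (b2 ++ tail)) (by simp [pvc2])]
      rw [pvEscA_ch _ _ (by simp [pvc6]), IH b2 hlen2 hb2 tail htail]
      rw [pvEscA_ch _ _ (by simp [pvc5])]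
      rw [IH b1 hlen1 hb1 ('}' :: b2) (by simp [pvc2])]
      rw [pvEscA_ch _ _ (by simp [pvc6])]
      simp

-- pvLoopB splits at a '}' boundary
theorem pvLoopB_append_rb : ∀ (n : Nat) (a : List Char), a.length ≤ n →
    ∀ (b : List Char) (out : List (List Char)) (stk : List (Bool × Nat)),
    pvLoopB (a ++ '}' :: b) out stk =
      pvLoopB ('}' :: b) (pvLoopB a out stk).1 (pvLoopB a out stk).2 := by
  intro n
  induction n with
  | zero =>
    intro a hl b out stk
    cases a with
    | nil => simp [pvLoopB_nil]
    | cons c cs => simp at hl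
  | succ n IH =>
    intro a hl b out stk
    cases a with
    | nil => simp [pvLoopB_nil]
    | cons c cs =>
      simp only [List.length_cons] at hl
      by_cases hg : c = '$' ∧ cs.head? = some '{'
      · obtain ⟨hcd, hh⟩ := hg
        cases cs with
        | nil => exact absurd hh (by simp)
        | cons y ys =>
          simp only [List.head?_cons, Option.some.injEq] at hh
          subst hh
          rw [List.cons_append, pvLoopB_group c _ _ _ ⟨hcd, rfl⟩]
          rw [pvLoopB_group c _ _ _ ⟨hcd, rfl⟩]
          simp only [List.tail_cons, List.cons_append]
          exact IH ys (by simp at hl; omega) b _ _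
      · have hg' : ¬(c = '$' ∧ (cs ++ '}' :: b).head? = some '{') := by
          intro hx
          rcases hx with ⟨hx1, hx2⟩
          cases cs with
          | nil => simp at hx2
          | cons y ys => exact hg ⟨hx1, by simpa using hx2⟩
        by_cases hc : c = '{'
        · subst hc
          rw [List.cons_append, pvLoopB_lbrace, pvLoopB_lbrace]
          exact IH cs (by omega) b _ _
        · by_cases hc2 : c = '}'
          · subst hc2
            rcases stk with _ | ⟨⟨isD, idx⟩, stk'⟩
            · rw [List.cons_append, pvLoopB_rbrace_nil, pvLoopB_rbrace_nil]
              exact IH cs (by omega) b _ _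
            · cases isD
              · rw [List.cons_append, pvLoopB_rbrace_pop_false, pvLoopB_rbrace_pop_false]
                exact IH cs (by omega) b _ _
              · rw [List.cons_append, pvLoopB_rbrace_pop_true, pvLoopB_rbrace_pop_true]
                exact IH cs (by omega) b _ _
          · rw [List.cons_append, pvLoopB_other c _ _ _ hg' hc hc2,
                pvLoopB_other c _ _ _ hg hc hc2]
            exact IH cs (by omega) b _ _

-- on a balanced region, pvLoopB appends a fixed segment and restores the stack,
-- and that segment flattens to pvEscA of the region
theorem pvLoopB_bal : ∀ (n : Nat) (l : List Char), l.length ≤ n → PvBal l →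
    ∃ seg, (∀ out stk, pvLoopB l out stk = (out ++ seg, stk)) ∧
      seg.flatten = pvEscA l := by
  intro n
  induction n with
  | zero =>
    intro l hl hb
    cases l with
    | nil => exact ⟨[], by simp [pvLoopB_nil], by simp [pvEscA_nil]⟩
    | cons c cs => simp at hl
  | succ n IH =>
    intro l hl hb
    cases hb with
    | nil => exact ⟨[], by simp [pvLoopB_nil], by simp [pvEscA_nil]⟩
    | ch c l' hc1 hc2 hbl' =>
      simp only [List.length_cons] at hl
      by_cases hg : c = '$' ∧ l'.head? = some '{'
      · obtain ⟨hcd, hh⟩ := hg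
        cases hbl' with
        | nil => exact absurd hh (by simp)
        | ch c2 l2 hq1 _ _ => simp at hh; exact absurd hh hq1
        | brace b1 b2 hb1 hb2 =>
          simp only [List.length_cons, List.length_append] at hl
          obtain ⟨s1, r1, f1⟩ := IH b1 (by omega) hb1
          obtain ⟨s2, r2, f2⟩ := IH b2 (by omega) hb2
          have e0 : '{' :: b1 ++ '}' :: b2 = '{' :: (b1 ++ '}' :: b2) := by simp
          rw [e0]
          refine ⟨['$', '{', '{'] :: s1 ++ ['}', '}'] :: s2, ?_, ?_⟩
          · intro out stk
            rw [pvLoopB_group c _ _ _ ⟨hcd, rfl⟩]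
            simp only [List.tail_cons]
            rw [pvLoopB_append_rb b1.length b1 le_rfl b2 _ _, r1 _ _]
            rw [show (out ++ [['$', '{']]) ++ s1 = out ++ ['$', '{'] :: s1 from by simp]
            rw [pvLoopB_rbrace_pop_true, pvSet_at_append, r2 _ _]
            simp
          · rw [pvEscA_group c _ ⟨hcd, rfl⟩]
            simp only [List.tail_cons]
            rw [pvScanClose_group b1 b2 hb1]
            simp only [List.dropLast_concat]
            simp only [List.flatten_cons, List.flatten_append]
            rw [f1, f2]
            simp
      · obtain ⟨s, r, f⟩ := IH l' (by omega) hbl'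
        refine ⟨[c] :: s, ?_, ?_⟩
        · intro out stk
          rw [pvLoopB_other c _ _ _ hg hc1 hc2, r _ _]
          simp
        · rw [pvEscA_ch c _ hg]
          simp only [List.flatten_cons]
          rw [f]
          simp
    | brace b1 b2 hb1 hb2 =>
      simp only [List.length_cons, List.length_append] at hl
      obtain ⟨s1, r1, f1⟩ := IH b1 (by omega) hb1
      obtain ⟨s2, r2, f2⟩ := IH b2 (by omega) hb2
      have e0 : '{' :: b1 ++ '}' :: b2 = '{' :: (b1 ++ '}' :: b2) := by simp
      rw [e0]
      refine ⟨['{'] :: s1 ++ ['}'] :: s2, ?_, ?_⟩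
      · intro out stk
        rw [pvLoopB_lbrace]
        rw [pvLoopB_append_rb b1.length b1 le_rfl b2 _ _, r1 _ _]
        rw [pvLoopB_rbrace_pop_false, r2 _ _]
        simp
      · rw [pvEscA_ch _ _ (by simp [pvc5])]
        rw [pvEscA_append b1.length b1 le_rfl hb1 ('}' :: b2) (by simp [pvc2])]
        rw [pvEscA_ch _ _ (by simp [pvc6])]
        simp only [List.flatten_cons, List.flatten_append]
        rw [f1, f2]
        simp

theorem pvNoUnclosed_tail (c : Char) (cs : List Char) (h : pvNoUnclosed (c :: cs) = true) :
    pvNoUnclosed cs = true := by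
  rw [pvNoUnclosed_cons] at h
  split at h
  · simp only [Bool.and_eq_true] at h
    exact h.2
  · exact h

theorem pvNoUnclosed_suffix : ∀ (a l : List Char), pvNoUnclosed (a ++ l) = true →
    pvNoUnclosed l = true := by
  intro a
  induction a with
  | nil => intro l h; exact h
  | cons c cs IH => intro l h; exact IH l (pvNoUnclosed_tail c (cs ++ l) h)

-- main lemma: with no unclosed "${" and a plain-only stack, pvLoopB's output is
-- out ++ seg with seg.flatten = pvEscA l
theorem pvTop : ∀ (n : Nat) (l : List Char), l.length ≤ n → pvNoUnclosed l = true →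
    ∃ seg, (∀ out stk, (∀ e ∈ stk, e.1 = false) → (pvLoopB l out stk).1 = out ++ seg) ∧
      seg.flatten = pvEscA l := by
  intro n
  induction n with
  | zero =>
    intro l hl hnu
    cases l with
    | nil => exact ⟨[], by simp [pvLoopB_nil], by simp [pvEscA_nil]⟩
    | cons c cs => simp at hl
  | succ n IH =>
    intro l hl hnu
    cases l with
    | nil => exact ⟨[], by simp [pvLoopB_nil], by simp [pvEscA_nil]⟩
    | cons c cs =>
      simp only [List.length_cons] at hl
      by_cases hg : c = '$' ∧ cs.head? = some '{'
      · obtain ⟨hcd, hh⟩ := hg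
        cases cs with
        | nil => exact absurd hh (by simp)
        | cons y rest =>
          simp only [List.head?_cons, Option.some.injEq] at hh
          subst hh
          rw [pvNoUnclosed_cons, if_pos ⟨hcd, rfl⟩] at hnu
          simp only [List.tail_cons] at hnu
          simp only [Bool.and_eq_true] at hnu
          obtain ⟨hr, hncs⟩ := hnu
          obtain ⟨inner, rest2, hsplit, hbal, -⟩ :=
            pvReach_decomp rest.length rest 1 le_rfl (by omega) hr
          subst hsplit
          obtain ⟨s1, r1, f1⟩ := pvLoopB_bal inner.length inner le_rfl hbal
          have hrest2 : pvNoUnclosed rest2 = true := by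
            refine pvNoUnclosed_suffix ('{' :: inner ++ ['}']) rest2 ?_
            simpa using hncs
          have hlen2 : rest2.length ≤ n := by
            simp only [List.length_cons, List.length_append] at hl; omega
          obtain ⟨s2, r2, f2⟩ := IH rest2 hlen2 hrest2
          refine ⟨['$', '{', '{'] :: s1 ++ ['}', '}'] :: s2, ?_, ?_⟩
          · intro out stk hstk
            rw [pvLoopB_group c _ _ _ ⟨hcd, rfl⟩]
            simp only [List.tail_cons]
            rw [pvLoopB_append_rb inner.length inner le_rfl rest2 _ _, r1 _ _]
            rw [show (out ++ [['$', '{']]) ++ s1 = out ++ ['$', '{'] :: s1 from by simp]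
            rw [pvLoopB_rbrace_pop_true, pvSet_at_append, r2 _ stk hstk]
            simp
          · rw [pvEscA_group c _ ⟨hcd, rfl⟩]
            simp only [List.tail_cons]
            rw [pvScanClose_group inner rest2 hbal]
            simp only [List.dropLast_concat]
            simp only [List.flatten_cons, List.flatten_append]
            rw [f1, f2]
            simp
      · have hncs : pvNoUnclosed cs = true := pvNoUnclosed_tail c cs hnu
        obtain ⟨s, r, f⟩ := IH cs (by omega) hncs
        by_cases hc : c = '{'
        · subst hc
          refine ⟨['{'] :: s, ?_, ?_⟩
          · intro out stk hstk
            rw [pvLoopB_lbrace]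
            rw [r _ ((false, out.length) :: stk) ?_]
            · simp
            · intro e he
              rcases List.mem_cons.mp he with h1 | h2
              · rw [h1]
              · exact hstk e h2
          · rw [pvEscA_ch _ _ hg]
            simp only [List.flatten_cons]
            rw [f]
            simp
        · by_cases hc2 : c = '}'
          · subst hc2
            refine ⟨['}'] :: s, ?_, ?_⟩
            · intro out stk hstk
              rcases stk with _ | ⟨⟨isD, idx⟩, stk'⟩
              · rw [pvLoopB_rbrace_nil, r _ [] (by simp)]
                simp
              · have hD : isD = false := by simpa using hstk (isD, idx) (by simp)
                subst hD
                rw [pvLoopB_rbrace_pop_false,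
                    r _ stk' (fun e he => hstk e (List.mem_cons_of_mem _ he))]
                simp
            · rw [pvEscA_ch _ _ hg]
              simp only [List.flatten_cons]
              rw [f]
              simp
          · refine ⟨[c] :: s, ?_, ?_⟩
            · intro out stk hstk
              rw [pvLoopB_other c _ _ _ hg hc hc2, r _ stk hstk]
              simp
            · rw [pvEscA_ch _ _ hg]
              simp only [List.flatten_cons]
              rw [f]
              simp


-- bridge: the fold pvSuffixScan computes exactly "pvNoUnclosed is false"
theorem pvBraceDelta_val (c : Char) :
    pvBraceDelta c = if c = '{' then 1 else if c = '}' then -1 else 0 := by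
  unfold pvBraceDelta
  by_cases h1 : c = '{'
  · subst h1; simp
  · by_cases h2 : c = '}'
    · subst h2; simp [h1]
    · simp [h1, h2]

def pvMinPref : List Char → Int
  | [] => 0
  | c :: cs => min (pvBraceDelta c) (pvBraceDelta c + pvMinPref cs)

theorem pvReach_minPref : ∀ (r : List Char) (d : Int), 1 ≤ d →
    (pvReaches0 r d = false ↔ 0 ≤ d - 1 + pvMinPref r) := by
  intro r
  induction r with
  | nil =>
    intro d hd
    rw [pvReaches0, pvMinPref]
    constructor
    · intro _; omega
    · intro _; rfl
  | cons c cs IH =>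
    intro d hd
    rw [pvReaches0_cons, pvMinPref]
    have hδ : (if c = '{' then d + 1 else if c = '}' then d - 1 else d) = d + pvBraceDelta c := by
      rw [pvBraceDelta_val]
      by_cases hc : c = '{' <;> by_cases hc2 : c = '}' <;> simp [hc, hc2] <;> omega
    rw [hδ]
    by_cases hz : d + pvBraceDelta c = 0
    · rw [if_pos hz]
      have hδ1 : pvBraceDelta c = -1 := by omega
      constructor
      · intro h; exact absurd h (by simp)
      · intro h
        exfalso
        have : min (pvBraceDelta c) (pvBraceDelta c + pvMinPref cs) ≤ -1 := by
          rw [hδ1]; omega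
        omega
    · rw [if_neg hz]
      have hd' : 1 ≤ d + pvBraceDelta c := by
        have : -1 ≤ pvBraceDelta c := by rw [pvBraceDelta_val]; split_ifs <;> omega
        omega
      rw [IH (d + pvBraceDelta c) hd']
      constructor
      · intro h
        have h1 : 0 ≤ d - 1 + pvBraceDelta c := by omega
        have h2 : 0 ≤ d - 1 + (pvBraceDelta c + pvMinPref cs) := by omega
        omega
      · intro h
        have h1 : d - 1 + min (pvBraceDelta c) (pvBraceDelta c + pvMinPref cs)
            ≤ d - 1 + (pvBraceDelta c + pvMinPref cs) := by
          have := min_le_right (pvBraceDelta c) (pvBraceDelta c + pvMinPref cs)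
          omega
        omega

theorem pvSuffixScan_spec : ∀ (l : List Char),
    pvSuffixScan l = (!(pvNoUnclosed l), l.head?, pvMinPref l, pvMinPref l.tail) := by
  intro l
  induction l with
  | nil => rw [pvNoUnclosed]; rfl
  | cons c cs IH =>
    have step : pvSuffixScan (c :: cs) =
        ((pvSuffixScan cs).1 ||
            (c == '$' && (pvSuffixScan cs).2.1 == some '{' && decide (0 ≤ (pvSuffixScan cs).2.2.2)),
          some c,
          min (pvBraceDelta c) (pvBraceDelta c + (pvSuffixScan cs).2.2.1),
          (pvSuffixScan cs).2.2.1) := rfl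
    rw [step, IH]
    simp only [List.tail_cons]
    rw [pvNoUnclosed_cons]
    have hrel := pvReach_minPref cs.tail 1 (le_refl _)
    by_cases hg : c = '$' ∧ cs.head? = some '{'
    · obtain ⟨hcd, hh⟩ := hg
      rw [if_pos ⟨hcd, hh⟩]
      have e1 : (c == '$') = true := by simp [hcd]
      have e2 : (cs.head? == some '{') = true := by simp [hh]
      have e3 : decide (0 ≤ pvMinPref cs.tail) = !pvReaches0 cs.tail 1 := by
        cases hr : pvReaches0 cs.tail 1 with
        | false =>
          have h0 := hrel.mp hr
          simp only [Bool.not_false, decide_eq_true_eq]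
          omega
        | true =>
          simp only [Bool.not_true, decide_eq_false_iff_not]
          intro hle
          rw [hrel.mpr (by omega)] at hr
          cases hr
      rw [e1, e2, e3]
      refine congrArg (fun b => (b, some c, _, _)) ?_
      cases pvReaches0 cs.tail 1 <;> cases pvNoUnclosed cs <;> rfl
    · rw [if_neg hg]
      have e1 : (c == '$' && cs.head? == some '{' && decide (0 ≤ pvMinPref cs.tail)) = false := by
        rcases Decidable.not_and_iff_or_not.mp hg with h1 | h2
        · simp [h1]
        · simp [h2]
      rw [e1]
      simp [pvMinPref]

theorem pvD_iff (l : List Char) : (pvSuffixScan l).1 = true ↔ pvNoUnclosed l = false := by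
  rw [pvSuffixScan_spec]
  cases pvNoUnclosed l <;> simp
-- ===== VERDICT (by name: the statement is the Claim_ definition above) =====
theorem escape_bash_variables_py_spec : Claim_unchanged_escape_bash_variables_py := by
  intro text _hDom hD
  have h : pvNoUnclosed text.toList = true := by
    cases hnu : pvNoUnclosed text.toList with
    | true => rfl
    | false =>
      exfalso
      apply hD
      unfold D_escape_bash_variables_py
      exact (pvD_iff text.toList).mpr hnu
  obtain ⟨seg, hrun, hflat⟩ := pvTop text.toList.length text.toList (le_refl _) h
  unfold escape_bash_variables_py escape_bash_variables_py_alt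
  rw [hrun [] [] (by simp)]
  simp [hflat]

theorem escape_bash_variables_py_changed : Claim_changed_escape_bash_variables_py := by
  unfold Claim_changed_escape_bash_variables_py
  refine ⟨by decide, by decide, ?_, ?_, by decide⟩
  · show escape_bash_variables_py "${a" = "${{}}"
    simp only [escape_bash_variables_py]
    rw [show "${a".toList = ['$', '{', 'a'] from by decide]
    rw [show pvEscA ['$', '{', 'a'] = ['$', '{', '{', '}', '}'] from by
      rw [pvEscA]; simp [pvScanClose, pvEscA_nil]]
    decide
  · show escape_bash_variables_py_alt "${a" = "${a"
    simp [escape_bash_variables_py_alt, pvLoopB]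
    decide
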